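-- pv_equiv track=rewrite | github.com/gagankarthik/ob-resume-builder-dev | backend/utils/chunk_resume.py | find_original_position
-- ===== SOURCE A (Python) =====
-- def find_original_position(raw_text: str, clean_position: int) -> int:
--     """
--     Find original position accounting for HTML tags
--     Equivalent to findOriginalPosition function in Node.js
--
--     Args:
--         raw_text: Original raw text with HTML
--         clean_position: Position in clean text
--
--     Returns:
--         Position in original text
--     """
--     html_position = 0
--     clean_count = 0
--
--     while html_position < len(raw_text) and clean_count < clean_position:
--         if raw_text[html_position] == '<':
--             # Skip HTML tag
--             while html_position < len(raw_text) and raw_text[html_position] != '>':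
--                 html_position += 1
--             if html_position < len(raw_text):
--                 html_position += 1  # Skip '>'
--         else:
--             clean_count += 1
--             html_position += 1
--
--     return html_position
-- ===== SOURCE B (Python) =====
-- def find_original_position(raw_text: str, clean_position: int) -> int:
--     """Staged approach: build the full clean->original index once, then look up.
--
--     stops[k] is the position in raw_text immediately after the (k+1)-th
--     clean (non-tag) character; the answer is a bounds-checked lookup.
--     """
--     if clean_position <= 0:
--         return 0
--     stops = []
--     in_tag = False
--     for i, c in enumerate(raw_text):
--         if in_tag:
--             in_tag = c != '>'
--         elif c == '<':
--             in_tag = True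
--         else:
--             stops.append(i + 1)
--     if clean_position <= len(stops):
--         return stops[clean_position - 1]
--     return len(raw_text)
-- ===== Notes on version B (the rewrite author's own statement) =====
-- stated objective: alternative
-- what changed: B replaces A's early-terminating counting scan with a staged algorithm: one full pass builds the list of original end-positions of all clean characters, then the answer is a bounds-checked lookup into that index.
import Mathlib
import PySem

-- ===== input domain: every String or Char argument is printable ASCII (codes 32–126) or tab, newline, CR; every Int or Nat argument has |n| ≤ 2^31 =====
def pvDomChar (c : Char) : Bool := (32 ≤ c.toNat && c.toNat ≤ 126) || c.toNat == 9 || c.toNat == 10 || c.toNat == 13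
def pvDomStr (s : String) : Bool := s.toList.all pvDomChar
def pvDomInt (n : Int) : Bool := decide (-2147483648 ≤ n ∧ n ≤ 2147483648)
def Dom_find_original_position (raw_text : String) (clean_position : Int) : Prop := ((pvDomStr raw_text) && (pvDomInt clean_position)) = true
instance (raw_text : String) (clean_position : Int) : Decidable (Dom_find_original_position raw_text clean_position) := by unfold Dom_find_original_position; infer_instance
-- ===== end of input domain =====

-- B builds the whole clean-to-original position index in one pass and answers by a
-- bounds-checked lookup, instead of A's early-terminating counting scan (objective: alternative).

-- ===== PORT A =====
-- A's outer while (at a non-'<' char: count and advance) and its inner tag-skipping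
-- while are ported as a mutual structural recursion over the remaining characters.
mutual
  def pvFindA : List Char → Int → Int → Int → Int
    | [], _, _, pos => pos
    | c :: rest, cc, cp, pos =>
      if cc < cp then
        if c = '<' then pvSkipA rest cc cp (pos + 1)
        else pvFindA rest (cc + 1) cp (pos + 1)
      else pos
  -- inner while: skip while char ≠ '>', then skip the '>' itself
  def pvSkipA : List Char → Int → Int → Int → Int
    | [], _, _, pos => pos
    | c :: rest, cc, cp, pos =>
      if c = '>' then pvFindA rest cc cp (pos + 1)
      else pvSkipA rest cc cp (pos + 1)
end

def find_original_position (raw_text : String) (clean_position : Int) : Int :=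
  pvFindA raw_text.toList 0 clean_position 0

-- ===== PORT B =====
-- B's index-building pass: pvStops cs b i returns the (absolute) end positions of
-- all clean characters of cs, scanning from index i with in_tag state b.
def pvStops : List Char → Bool → Int → List Int
  | [], _, _ => []
  | c :: rest, inTag, i =>
    if inTag then pvStops rest (decide (c ≠ '>')) (i + 1)
    else if c = '<' then pvStops rest true (i + 1)
    else (i + 1) :: pvStops rest false (i + 1)

def find_original_position_alt (raw_text : String) (clean_position : Int) : Int :=
  let cs := raw_text.toList
  if clean_position ≤ 0 then 0
  else
    let stops := pvStops cs false 0
    if clean_position ≤ (stops.length : Int) then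
      (PySem.List.pyGet? stops (clean_position - 1)).getD 0
    else (cs.length : Int)

-- ===== PRECONDITION & SPEC =====
def Spec_find_original_position (raw_text : String) (clean_position : Int) (out : Int) : Prop := out = find_original_position_alt raw_text clean_position
instance (raw_text : String) (clean_position : Int) (out : Int) : Decidable (Spec_find_original_position raw_text clean_position out) := by unfold Spec_find_original_position; infer_instance

-- ===== CLAIM (what is proved, stated in full; the proofs are below) =====
def Claim_equal_find_original_position : Prop := ∀ (raw_text : String) (clean_position : Int), Dom_find_original_position raw_text clean_position → Spec_find_original_position raw_text clean_position (find_original_position raw_text clean_position)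

-- ===== LEMMAS AND PROOFS =====

theorem pvFindA_stop (cs : List Char) (cc cp pos : Int) (h : ¬ cc < cp) :
    pvFindA cs cc cp pos = pos := by
  cases cs <;> simp [pvFindA, h]

-- A's scan, started with clean budget k+1 remaining, returns the k-th entry of the
-- stop index (or the end of the string if there are fewer clean characters).
theorem A_stops : ∀ (cs : List Char) (b : Bool) (cc pos : Int) (k : Nat),
    (if b then pvSkipA else pvFindA) cs cc (cc + 1 + k) pos =
      ((pvStops cs b pos)[k]?).getD (pos + cs.length) := by
  intro cs
  induction cs with
  | nil =>
    intro b cc pos k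
    cases b <;> simp [pvFindA, pvSkipA, pvStops]
  | cons c rest ih =>
    intro b cc pos k
    cases b with
    | true =>
      by_cases hc : c = '>'
      · have := ih false cc (pos + 1) k
        simp only [if_pos, if_neg, Bool.false_eq_true, not_false_iff] at this ⊢
        simp [pvSkipA, pvStops, hc, this]
        ring_nf
      · have := ih true cc (pos + 1) k
        simp only [if_pos] at this ⊢
        simp [pvSkipA, pvStops, hc, this]
        ring_nf
    | false =>
      have hlt : cc < cc + 1 + (k : Int) := by
        have : (0 : Int) ≤ (k : Int) := Int.natCast_nonneg k
        omega
      by_cases hc : c = '<'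
      · have := ih true cc (pos + 1) k
        simp only [if_pos] at this
        simp only [if_neg, Bool.false_eq_true, not_false_iff] at ⊢
        simp [pvFindA, pvStops, hlt, hc, this]
        ring_nf
      · simp only [if_neg, Bool.false_eq_true, not_false_iff]
        have hL : ∀ cp', cc < cp' → pvFindA (c :: rest) cc cp' pos
            = pvFindA rest (cc + 1) cp' (pos + 1) := by
          intro cp' h; simp [pvFindA, h, hc]
        have hR : pvStops (c :: rest) false pos = (pos + 1) :: pvStops rest false (pos + 1) := by
          simp [pvStops, hc]
        rw [hL _ hlt, hR]
        cases k with
        | zero =>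
          rw [pvFindA_stop rest (cc + 1) _ (pos + 1) (by simp)]
          simp
        | succ j =>
          have := ih false (cc + 1) (pos + 1) j
          simp only [if_neg, Bool.false_eq_true, not_false_iff] at this
          have harg : cc + 1 + 1 + (j : Int) = cc + 1 + ((j + 1 : Nat) : Int) := by push_cast; ring
          rw [harg] at this
          rw [List.getElem?_cons_succ, this]
          congr 1
          simp only [List.length_cons]
          push_cast
          ring

theorem find_original_position_spec : Claim_equal_find_original_position := by
  intro raw cp _
  unfold Spec_find_original_position find_original_position find_original_position_alt
  set cs := raw.toList with hcs
  by_cases h0 : cp ≤ 0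
  · simp only [if_pos h0]
    exact pvFindA_stop cs 0 cp 0 (by omega)
  · simp only [if_neg h0]
    set stops := pvStops cs false 0 with hstops
    set k := (cp - 1).toNat with hk
    have hcp : cp = 0 + 1 + (k : Int) := by omega
    have hA := A_stops cs false 0 0 k
    simp only [if_neg, Bool.false_eq_true, not_false_iff] at hA
    rw [← hcp] at hA
    rw [hA, ← hstops]
    by_cases hle : cp ≤ (stops.length : Int)
    · have hklt : k < stops.length := by omega
      have hidx : cp - 1 = (k : Int) := by omega
      rw [if_pos hle, hidx, PySem.List.pyGet?_natCast]
      simp [List.getElem?_eq_getElem hklt]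
    · have hkge : stops.length ≤ k := by omega
      rw [if_neg hle, List.getElem?_eq_none hkge]
      simp
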